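-- pv_equiv track=rewrite | github.com/ymzhang0/Photo-induced-phase-transition | tools.py | eigen_merge
-- ===== SOURCE A (Python) =====
-- def eigen_merge(eigen_normalize,nele):
--     eigen_merge_v = []
--     eigen_merge_c = []
--     for i in eigen_normalize:
--         for j in i[0 : int(nele/2)]:
--             eigen_merge_v.append(j)
--     for i in eigen_normalize:
--         for j in i[int(nele/2) : len(i)]:
--             eigen_merge_c.append(j)
--     return [eigen_merge_v, eigen_merge_c]
-- ===== SOURCE B (Python) =====
-- def eigen_merge(eigen_normalize, nele):
--     half = int(nele/2)
--
--     def go(rows):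
--         # recursively split the remaining rows into (valence, conduction) parts,
--         # prepending this row's two slices in front of the results for the tail
--         if not rows:
--             return [], []
--         v, c = go(rows[1:])
--         row = rows[0]
--         return row[0:half] + v, row[half:len(row)] + c
--
--     v, c = go(eigen_normalize)
--     return [v, c]
-- ===== Notes on version B (the rewrite author's own statement) =====
-- stated objective: alternative
-- what changed: Replaces A's two staged iterative append loops over the whole list by a single recursive traversal that builds both halves simultaneously as a pair, assembling each result back-to-front by list concatenation, with int(nele/2) computed once.
import Mathlib
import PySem

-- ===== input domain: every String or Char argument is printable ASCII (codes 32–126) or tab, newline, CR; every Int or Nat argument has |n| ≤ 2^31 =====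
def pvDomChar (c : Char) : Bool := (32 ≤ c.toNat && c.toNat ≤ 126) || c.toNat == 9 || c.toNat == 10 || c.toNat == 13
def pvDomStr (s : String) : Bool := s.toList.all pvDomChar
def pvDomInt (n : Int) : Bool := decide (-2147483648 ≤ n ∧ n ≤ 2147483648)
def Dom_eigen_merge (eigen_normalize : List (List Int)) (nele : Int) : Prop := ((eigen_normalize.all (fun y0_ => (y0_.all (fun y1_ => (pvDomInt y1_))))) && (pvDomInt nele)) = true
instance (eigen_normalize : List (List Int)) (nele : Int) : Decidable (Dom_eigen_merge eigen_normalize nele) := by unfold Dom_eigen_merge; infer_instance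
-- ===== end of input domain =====

-- B replaces A's two staged iterative append loops by one recursive traversal that
-- builds both halves simultaneously as a pair, concatenating back-to-front; objective: alternative.
-- int(nele/2) truncates toward zero; exact on |nele| ≤ 2^31, ported as Int.tdiv nele 2.

-- ===== PORT A =====
def eigen_merge (eigen_normalize : List (List Int)) (nele : Int) : List (List Int) :=
  let eigen_merge_v : List Int := []
  let eigen_merge_c : List Int := []
  let eigen_merge_v := eigen_normalize.foldl
    (fun acc i => (PySem.List.slice i (some 0) (some (Int.tdiv nele 2))).foldl
      (fun a j => a ++ [j]) acc) eigen_merge_v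
  let eigen_merge_c := eigen_normalize.foldl
    (fun acc i => (PySem.List.slice i (some (Int.tdiv nele 2)) (some (i.length : Int))).foldl
      (fun a j => a ++ [j]) acc) eigen_merge_c
  [eigen_merge_v, eigen_merge_c]

-- ===== PORT B =====
-- helper 'go' of Source B: recursion on the rows, returning (valence, conduction) as a pair
def goEM (half : Int) : List (List Int) → List Int × List Int
  | [] => ([], [])
  | row :: rs =>
    let p := goEM half rs
    (PySem.List.slice row (some 0) (some half) ++ p.1,
     PySem.List.slice row (some half) (some (row.length : Int)) ++ p.2)

def eigen_merge_alt (eigen_normalize : List (List Int)) (nele : Int) : List (List Int) :=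
  let half := Int.tdiv nele 2
  let p := goEM half eigen_normalize
  [p.1, p.2]

-- ===== PRECONDITION & SPEC =====
def Spec_eigen_merge (eigen_normalize : List (List Int)) (nele : Int) (out : List (List Int)) : Prop := out = eigen_merge_alt eigen_normalize nele
instance (eigen_normalize : List (List Int)) (nele : Int) (out : List (List Int)) : Decidable (Spec_eigen_merge eigen_normalize nele out) := by unfold Spec_eigen_merge; infer_instance

-- ===== CLAIM (what is proved, stated in full; the proofs are below) =====
def Claim_equal_eigen_merge : Prop := ∀ (eigen_normalize : List (List Int)) (nele : Int), Dom_eigen_merge eigen_normalize nele → Spec_eigen_merge eigen_normalize nele (eigen_merge eigen_normalize nele)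

-- ===== LEMMAS AND PROOFS =====

-- appending the elements of a list one by one appends the list
theorem foldl_push (acc : List Int) (l : List Int) :
    l.foldl (fun a j => a ++ [j]) acc = acc ++ l := by
  induction l generalizing acc with
  | nil => simp
  | cons x xs ih => simp [List.foldl, ih]

-- A's outer loop over rows is a flatMap of the sliced rows
theorem loop_flatMap (e : List (List Int)) (g : List Int → List Int) (acc : List Int) :
    e.foldl (fun acc i => (g i).foldl (fun a j => a ++ [j]) acc) acc = acc ++ e.flatMap g := by
  induction e generalizing acc with
  | nil => simp
  | cons r rs ih =>
    rw [List.foldl_cons, foldl_push, ih, List.flatMap_cons, List.append_assoc]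

-- B's recursion computes the two flatMaps
theorem goEM_eq (half : Int) (e : List (List Int)) :
    goEM half e = (e.flatMap (fun row => PySem.List.slice row (some 0) (some half)),
                   e.flatMap (fun row => PySem.List.slice row (some half) (some (row.length : Int)))) := by
  induction e with
  | nil => rfl
  | cons r rs ih => simp [goEM, ih]

-- ===== VERDICT (by name: the statement is the Claim_ definition above) =====
theorem eigen_merge_spec : Claim_equal_eigen_merge := by
  intro e n _
  show eigen_merge e n = eigen_merge_alt e n
  simp only [eigen_merge, eigen_merge_alt, loop_flatMap, List.nil_append, goEM_eq]
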